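-- pv_equiv track=rewrite | github.com/olsenlabmit/NERD | Tools/polymersearch/graphs.py | sub_obj_with_Bk
-- ===== SOURCE A (Python) =====
-- def get_objects(ends):
--     i = 0
--     o = []
--     start = []
--     while i < len(ends):
--         if ends[i] == "{":
--             start.append(i)
--             object = "{"
--             count = 1
--             i += 1
--             while count != 0:
--                 if ends[i] == "{":
--                     count += 1
--                 if ends[i] == "}":
--                     count -= 1
--                 object += ends[i]
--                 i += 1
--             o.append(object)
--         else:
--             i += 1
--     return [o, start]
--
-- def sub_obj_with_Bk(bigsmiles):
--     smiles = ""
--     counter = 0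
--     objects = get_objects(bigsmiles)[0]
--     indices = get_objects(bigsmiles)[1]
--     for i in range(len(objects)):
--         smiles += bigsmiles[counter:indices[i]]
--         smiles += "[Bk]"
--         counter += (indices[i] - counter) + len(objects[i])
--     smiles += bigsmiles[counter:]
--     return smiles, objects
-- ===== SOURCE B (Python) =====
-- def sub_obj_with_Bk(bigsmiles):
--     # Single forward pass: copy characters, and on each top-level '{' scan to its
--     # matching '}', record the slice as an object and emit '[Bk]' instead.
--     parts = []
--     objects = []
--     i = 0
--     n = len(bigsmiles)
--     while i < n:
--         c = bigsmiles[i]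
--         if c == "{":
--             start = i
--             count = 1
--             i += 1
--             while count != 0:
--                 ch = bigsmiles[i]
--                 if ch == "{":
--                     count += 1
--                 elif ch == "}":
--                     count -= 1
--                 i += 1
--             objects.append(bigsmiles[start:i])
--             parts.append("[Bk]")
--         else:
--             parts.append(c)
--             i += 1
--     return "".join(parts), objects
-- ===== Notes on version B (the rewrite author's own statement) =====
-- stated objective: simpler
-- what changed: A builds an (objects, start-indices) table by calling get_objects twice and then reconstructs the output with a counter/slicing loop; B is a single forward pass that emits characters or '[Bk]' directly while collecting each brace-delimited object as a slice, removing the repeated scans.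
import Mathlib
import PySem

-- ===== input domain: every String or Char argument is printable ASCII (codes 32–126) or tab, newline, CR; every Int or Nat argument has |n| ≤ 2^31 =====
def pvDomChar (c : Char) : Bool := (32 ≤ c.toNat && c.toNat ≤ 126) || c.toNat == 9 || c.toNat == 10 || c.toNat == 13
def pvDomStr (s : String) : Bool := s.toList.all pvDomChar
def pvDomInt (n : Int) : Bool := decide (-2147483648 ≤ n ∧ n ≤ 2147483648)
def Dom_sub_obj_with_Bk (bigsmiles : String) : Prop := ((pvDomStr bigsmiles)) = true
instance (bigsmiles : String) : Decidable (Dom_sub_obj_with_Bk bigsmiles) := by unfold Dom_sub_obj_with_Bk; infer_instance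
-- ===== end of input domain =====

-- B replaces A's table-then-reconstruct design (get_objects called twice, then a
-- counter/slicing loop) by one forward pass that emits the output directly (objective:
-- simpler). Equivalence is proved on Pre_ = inputs where every '{' is matched (elsewhere
-- both Pythons raise IndexError). The loops are ported with a fuel argument (callers pass
-- the string length) that only makes the recursion structural; it is never exhausted on
-- inputs satisfying Pre_.

-- ===== PORT A =====
-- Ports work over List Char; python slice b[a:c] (0 ≤ a, c) is (take c).drop a
def pvSlice (s : List Char) (a b : Nat) : List Char := (s.take b).drop a

-- the two separate 'if's of A's inner loop: +1 for '{', -1 for '}'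
def pvDelta (c : Char) : Int := (if c = '{' then 1 else 0) + (if c = '}' then -1 else 0)

-- inner 'while count != 0' of get_objects; none = IndexError on an unmatched '{'
def goInner (ends : List Char) (fuel i : Nat) (count : Int) (object : List Char) :
    Option (List Char × Nat) :=
  if count = 0 then some (object, i)
  else
    match ends[i]? with
    | none => none
    | some c =>
      match fuel with
      | 0 => none                -- unreachable: callers pass fuel ≥ len(ends) ≥ steps left
      | fuel+1 => goInner ends fuel (i+1) (count + pvDelta c) (object ++ [c])

-- outer 'while i < len(ends)' of get_objects
def goOuter (ends : List Char) (fuel i : Nat) (o : List (List Char)) (start : List Nat) :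
    List (List Char) × List Nat :=
  match fuel with
  | 0 => (o, start)              -- unreachable: callers pass fuel ≥ len(ends) ≥ steps left
  | fuel+1 =>
    match ends[i]? with
    | none => (o, start)         -- i ≥ len(ends): loop exits
    | some c =>
      if c = '{' then
        match goInner ends ends.length (i+1) 1 ['{'] with
        | some r => goOuter ends fuel r.2 (o ++ [r.1]) (start ++ [i])
        | none => (o, start)     -- IndexError in Python; outside Pre_
      else goOuter ends fuel (i+1) o start

def getObjects (ends : List Char) : List (List Char) × List Nat :=
  goOuter ends ends.length 0 [] []

-- body of A's 'for i in range(len(objects))' loop; state = (smiles, counter)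
def reconStep (ends : List Char) (objects : List (List Char)) (indices : List Nat)
    (st : List Char × Nat) (k : Nat) : List Char × Nat :=
  let idx := indices.getD k 0
  (st.1 ++ pvSlice ends st.2 idx ++ "[Bk]".toList,
   st.2 + (idx - st.2) + (objects.getD k []).length)

def sub_obj_with_Bk (bigsmiles : String) : String × List String :=
  let ends := bigsmiles.toList
  let objects := (getObjects ends).1
  let indices := (getObjects ends).2
  let r := (List.range objects.length).foldl (reconStep ends objects indices) ([], 0)
  (String.ofList (r.1 ++ ends.drop r.2), objects.map String.ofList)

-- ===== PORT B =====
-- inner brace scan of B: only tracks the end index (the object is recovered as a slice)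
def scanB (s : List Char) (fuel i : Nat) (count : Int) : Option Nat :=
  if count = 0 then some i
  else
    match s[i]? with
    | none => none               -- IndexError in Python; outside Pre_
    | some ch =>
      match fuel with
      | 0 => none                -- unreachable: callers pass fuel ≥ len(s) ≥ steps left
      | fuel+1 =>
        scanB s fuel (i+1) (if ch = '{' then count + 1 else if ch = '}' then count - 1 else count)

-- B's single forward pass; state = (parts, objects)
def loopB (s : List Char) (fuel i : Nat) (parts : List Char) (objects : List (List Char)) :
    List Char × List (List Char) :=
  match fuel with
  | 0 => (parts, objects)        -- unreachable: callers pass fuel ≥ len(s) ≥ steps left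
  | fuel+1 =>
    match s[i]? with
    | none => (parts, objects)   -- i ≥ len: loop exits
    | some c =>
      if c = '{' then
        match scanB s s.length (i+1) 1 with
        | some j => loopB s fuel j (parts ++ "[Bk]".toList) (objects ++ [pvSlice s i j])
        | none => (parts, objects)   -- IndexError in Python; outside Pre_
      else loopB s fuel (i+1) (parts ++ [c]) objects

def sub_obj_with_Bk_alt (bigsmiles : String) : String × List String :=
  let s := bigsmiles.toList
  let r := loopB s s.length 0 [] []
  (String.ofList r.1, r.2.map String.ofList)

-- ===== PRECONDITION & SPEC =====
-- Pre_ excludes exactly the inputs with an unmatched '{', on which A's inner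
-- 'while count != 0' runs off the end of the string and raises IndexError
-- (B raises there too): every '{' must be followed by a position j where the
-- braces opened at it are all closed.
def Pre_sub_obj_with_Bk (bigsmiles : String) : Prop :=
  ∀ i < bigsmiles.toList.length, bigsmiles.toList[i]? = some '{' →
    ∃ j < bigsmiles.toList.length + 1, i < j ∧
      (pvSlice bigsmiles.toList i j).count '{' = (pvSlice bigsmiles.toList i j).count '}'
instance (bigsmiles : String) : Decidable (Pre_sub_obj_with_Bk bigsmiles) := by
  unfold Pre_sub_obj_with_Bk; infer_instance

def pvWitness_sub_obj_with_Bk : String := "C{A}O"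

def Spec_sub_obj_with_Bk (bigsmiles : String) (out : String × List String) : Prop := out = sub_obj_with_Bk_alt bigsmiles
instance (bigsmiles : String) (out : String × List String) : Decidable (Spec_sub_obj_with_Bk bigsmiles out) := by unfold Spec_sub_obj_with_Bk; infer_instance

-- ===== CLAIM (what is proved, stated in full; the proofs are below) =====
def Claim_equal_sub_obj_with_Bk : Prop := ∀ (bigsmiles : String), Dom_sub_obj_with_Bk bigsmiles → Pre_sub_obj_with_Bk bigsmiles → Spec_sub_obj_with_Bk bigsmiles (sub_obj_with_Bk bigsmiles)

-- ===== LEMMAS AND PROOFS =====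

theorem pv_slice_eq (s : List Char) (a b : Nat) : pvSlice s a b = (s.drop a).take (b - a) := by
  simp [pvSlice, List.drop_take]

theorem pv_slice_self (s : List Char) (a : Nat) : pvSlice s a a = [] := by
  simp [pv_slice_eq]

theorem pv_slice_cons (s : List Char) (a b : Nat) (ha : a < s.length) (hab : a < b) :
    pvSlice s a b = s[a] :: pvSlice s (a+1) b := by
  rw [pv_slice_eq, pv_slice_eq, List.drop_eq_getElem_cons ha]
  have : b - a = (b - (a+1)) + 1 := by omega
  rw [this, List.take_succ_cons]

theorem pv_slice_length (s : List Char) (a b : Nat) (hab : a ≤ b) (hb : b ≤ s.length) :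
    (pvSlice s a b).length = b - a := by
  rw [pv_slice_eq]
  simp
  omega

-- A's two ifs and B's if/elif update the counter identically
theorem pv_delta_eq (k : Int) (c : Char) :
    (if c = '{' then k + 1 else if c = '}' then k - 1 else k) = k + pvDelta c := by
  by_cases h1 : c = '{' <;> by_cases h2 : c = '}' <;> simp_all [pvDelta] <;> omega

-- brace balance of s[a:b], counting '{' as +1 and '}' as -1
def pvBal (s : List Char) (a b : Nat) : Int :=
  ((pvSlice s a b).count '{' : Int) - ((pvSlice s a b).count '}' : Int)

theorem pv_bal_cons (s : List Char) (a b : Nat) (ha : a < s.length) (hab : a < b) :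
    pvBal s a b = pvDelta s[a] + pvBal s (a+1) b := by
  unfold pvBal
  rw [pv_slice_cons s a b ha hab]
  by_cases h1 : s[a] = '{' <;> by_cases h2 : s[a] = '}' <;>
    simp_all [pvDelta, List.count_cons] <;> push_cast <;> ring

-- one-step unfoldings of the fueled scans (definitional)
theorem scanB_zero_red (s : List Char) (i : Nat) (count : Int) :
    scanB s 0 i count = (if count = 0 then some i else
      match s[i]? with | none => none | some _ => none) := by
  conv_lhs => rw [scanB]

theorem scanB_succ_red (s : List Char) (fuel i : Nat) (count : Int) :
    scanB s (fuel+1) i count = (if count = 0 then some i else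
      match s[i]? with
      | none => none
      | some ch => scanB s fuel (i+1)
          (if ch = '{' then count + 1 else if ch = '}' then count - 1 else count)) := by
  conv_lhs => rw [scanB]

theorem goInner_zero_red (ends : List Char) (i : Nat) (count : Int) (object : List Char) :
    goInner ends 0 i count object = (if count = 0 then some (object, i) else
      match ends[i]? with | none => none | some _ => none) := by
  conv_lhs => rw [goInner]

theorem goInner_succ_red (ends : List Char) (fuel i : Nat) (count : Int) (object : List Char) :
    goInner ends (fuel+1) i count object = (if count = 0 then some (object, i) else
      match ends[i]? with
      | none => none
      | some c => goInner ends fuel (i+1) (count + pvDelta c) (object ++ [c])) := by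
  conv_lhs => rw [goInner]

theorem scanB_bounds (s : List Char) :
    ∀ fuel i count r, scanB s fuel i count = some r →
      i ≤ r ∧ (count ≠ 0 → i < r ∧ r ≤ s.length) := by
  intro fuel
  induction fuel with
  | zero =>
    intro i count r hr
    rw [scanB_zero_red] at hr
    split at hr
    · cases hr; simp_all
    · split at hr <;> cases hr
  | succ fuel ih =>
    intro i count r hr
    rw [scanB_succ_red] at hr
    split at hr
    · cases hr; simp_all
    · rename_i hc
      split at hr
      · cases hr
      · rename_i ch hcell
        have hb := ih _ _ _ hr
        have hlt := (List.getElem?_eq_some_iff.mp hcell).1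
        refine ⟨by omega, fun _ => ⟨by omega, ?_⟩⟩
        by_cases hz : (if ch = '{' then count + 1 else if ch = '}' then count - 1 else count) = 0
        · have : r = i + 1 := by
            cases fuel with
            | zero => rw [scanB_zero_red, if_pos hz] at hr; cases hr; rfl
            | succ fuel' => rw [scanB_succ_red, if_pos hz] at hr; cases hr; rfl
          omega
        · exact (hb.2 hz).2

theorem goInner_bounds (ends : List Char) :
    ∀ fuel i count object r, goInner ends fuel i count object = some r →
      i ≤ r.2 ∧ (count ≠ 0 → i < r.2 ∧ r.2 ≤ ends.length) := by
  intro fuel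
  induction fuel with
  | zero =>
    intro i count object r hr
    rw [goInner_zero_red] at hr
    split at hr
    · cases hr; simp_all
    · split at hr <;> cases hr
  | succ fuel ih =>
    intro i count object r hr
    rw [goInner_succ_red] at hr
    split at hr
    · cases hr; simp_all
    · rename_i hc
      split at hr
      · cases hr
      · rename_i c hcell
        have hb := ih _ _ _ _ hr
        have hlt := (List.getElem?_eq_some_iff.mp hcell).1
        refine ⟨by omega, fun _ => ⟨by omega, ?_⟩⟩
        by_cases hz : count + pvDelta c = 0
        · have : r.2 = i + 1 := by
            cases fuel with
            | zero => rw [goInner_zero_red, if_pos hz] at hr; cases hr; rfl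
            | succ fuel' => rw [goInner_succ_red, if_pos hz] at hr; cases hr; rfl
          omega
        · exact (hb.2 hz).2

-- A's inner loop computes B's scan plus the scanned slice
theorem goInner_eq_scanB (s : List Char) :
    ∀ fuel i count object, goInner s fuel i count object =
      match scanB s fuel i count with
      | none => none
      | some j => some (object ++ pvSlice s i j, j) := by
  intro fuel
  induction fuel with
  | zero =>
    intro i count object
    rw [goInner_zero_red, scanB_zero_red]
    split
    · simp [pv_slice_self]
    · split <;> rfl
  | succ fuel ih =>
    intro i count object
    rw [goInner_succ_red, scanB_succ_red]
    split
    · simp [pv_slice_self]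
    · rename_i hc
      cases hcell : s[i]? with
      | none => rfl
      | some c =>
        simp only []
        rw [pv_delta_eq, ih]
        cases hj : scanB s fuel (i+1) (count + pvDelta c) with
        | none => rfl
        | some j =>
          have hij := (scanB_bounds s fuel (i+1) (count + pvDelta c) j hj).1
          have hlt := (List.getElem?_eq_some_iff.mp hcell).1
          have hc' : s[i] = c := (List.getElem?_eq_some_iff.mp hcell).2
          simp only []
          rw [pv_slice_cons s i j hlt (by omega), hc']
          simp

-- if the braces opened balance out at some j, B's scan succeeds
theorem scanB_success (s : List Char) :
    ∀ fuel i count, s.length ≤ fuel + i →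
      (∃ j, i ≤ j ∧ j ≤ s.length ∧ count + pvBal s i j = 0) →
      ∃ r, scanB s fuel i count = some r := by
  intro fuel
  induction fuel with
  | zero =>
    intro i count hn ⟨j, hij, hj, hb⟩
    by_cases hc : count = 0
    · exact ⟨i, by rw [scanB_zero_red, if_pos hc]⟩
    · have hji : i = j := by omega
      subst hji
      simp [pvBal, pv_slice_self] at hb
      omega
  | succ fuel ih =>
    intro i count hn ⟨j, hij, hj, hb⟩
    by_cases hc : count = 0
    · exact ⟨i, by rw [scanB_succ_red, if_pos hc]⟩
    · have hij' : i < j := by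
        rcases Nat.lt_or_ge i j with h | h
        · exact h
        · have : i = j := by omega
          subst this
          simp [pvBal, pv_slice_self] at hb
          omega
      have hilen : i < s.length := by omega
      have hget : s[i]? = some s[i] := List.getElem?_eq_some_iff.mpr ⟨hilen, rfl⟩
      have hbal := pv_bal_cons s i j hilen hij'
      obtain ⟨r, hr⟩ := ih (i+1) (count + pvDelta s[i]) (by omega)
        ⟨j, by omega, hj, by omega⟩
      refine ⟨r, ?_⟩
      rw [scanB_succ_red, if_neg hc, hget]
      simp only []
      rw [pv_delta_eq]
      exact hr

-- one-step unfoldings of the fueled loops (definitional)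
theorem goOuter_zero_red (ends : List Char) (i : Nat) (o : List (List Char)) (st : List Nat) :
    goOuter ends 0 i o st = (o, st) := by
  conv_lhs => rw [goOuter]

theorem goOuter_succ_red (ends : List Char) (fuel i : Nat) (o : List (List Char)) (st : List Nat) :
    goOuter ends (fuel+1) i o st = (match ends[i]? with
      | none => (o, st)
      | some c =>
        if c = '{' then
          match goInner ends ends.length (i+1) 1 ['{'] with
          | some r => goOuter ends fuel r.2 (o ++ [r.1]) (st ++ [i])
          | none => (o, st)
        else goOuter ends fuel (i+1) o st) := by
  conv_lhs => rw [goOuter]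

theorem loopB_zero_red (s : List Char) (i : Nat) (parts : List Char) (ob : List (List Char)) :
    loopB s 0 i parts ob = (parts, ob) := by
  conv_lhs => rw [loopB]

theorem loopB_succ_red (s : List Char) (fuel i : Nat) (parts : List Char) (ob : List (List Char)) :
    loopB s (fuel+1) i parts ob = (match s[i]? with
      | none => (parts, ob)
      | some c =>
        if c = '{' then
          match scanB s s.length (i+1) 1 with
          | some j => loopB s fuel j (parts ++ "[Bk]".toList) (ob ++ [pvSlice s i j])
          | none => (parts, ob)
        else loopB s fuel (i+1) (parts ++ [c]) ob) := by
  conv_lhs => rw [loopB]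

-- unfolding lemmas for A's outer loop (one loop iteration = one unit of fuel)
theorem goOuter_none (ends : List Char) (fuel i : Nat) (o : List (List Char)) (st : List Nat)
    (h : ends[i]? = none) : goOuter ends (fuel+1) i o st = (o, st) := by
  unfold goOuter
  split
  · rfl
  · rename_i c hsc; rw [h] at hsc; cases hsc

theorem goOuter_brace (ends : List Char) (fuel i : Nat) (o : List (List Char)) (st : List Nat)
    (r : List Char × Nat) (h : ends[i]? = some '{')
    (hs : goInner ends ends.length (i+1) 1 ['{'] = some r) :
    goOuter ends (fuel+1) i o st = goOuter ends fuel r.2 (o ++ [r.1]) (st ++ [i]) := by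
  rw [goOuter_succ_red]
  split
  · rename_i hsc; rw [h] at hsc; cases hsc
  · rename_i c hsc; rw [h] at hsc; cases hsc
    rw [if_pos rfl]
    split
    · rename_i r' hs'; rw [hs] at hs'; cases hs'; rfl
    · rename_i hs'; rw [hs] at hs'; cases hs'

theorem goOuter_brace_none (ends : List Char) (fuel i : Nat) (o : List (List Char)) (st : List Nat)
    (h : ends[i]? = some '{') (hs : goInner ends ends.length (i+1) 1 ['{'] = none) :
    goOuter ends (fuel+1) i o st = (o, st) := by
  rw [goOuter_succ_red]
  split
  · rfl
  · rename_i c hsc; rw [h] at hsc; cases hsc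
    rw [if_pos rfl]
    split
    · rename_i r' hs'; rw [hs] at hs'; cases hs'
    · rfl

theorem goOuter_other (ends : List Char) (fuel i : Nat) (o : List (List Char)) (st : List Nat)
    (c : Char) (h : ends[i]? = some c) (hc : c ≠ '{') :
    goOuter ends (fuel+1) i o st = goOuter ends fuel (i+1) o st := by
  rw [goOuter_succ_red]
  split
  · rename_i hsc; rw [h] at hsc; cases hsc
  · rename_i c' hsc; rw [h] at hsc; cases hsc
    rw [if_neg hc]

-- unfolding lemmas for B's loop
theorem loopB_none (s : List Char) (fuel i : Nat) (parts : List Char) (ob : List (List Char))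
    (h : s[i]? = none) : loopB s (fuel+1) i parts ob = (parts, ob) := by
  unfold loopB
  split
  · rfl
  · rename_i c hsc; rw [h] at hsc; cases hsc

theorem loopB_brace (s : List Char) (fuel i : Nat) (parts : List Char) (ob : List (List Char))
    (j : Nat) (h : s[i]? = some '{') (hs : scanB s s.length (i+1) 1 = some j) :
    loopB s (fuel+1) i parts ob
      = loopB s fuel j (parts ++ "[Bk]".toList) (ob ++ [pvSlice s i j]) := by
  rw [loopB_succ_red]
  split
  · rename_i hsc; rw [h] at hsc; cases hsc
  · rename_i c hsc; rw [h] at hsc; cases hsc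
    rw [if_pos rfl]
    split
    · rename_i j' hs'; rw [hs] at hs'; cases hs'; rfl
    · rename_i hs'; rw [hs] at hs'; cases hs'

theorem loopB_other (s : List Char) (fuel i : Nat) (parts : List Char) (ob : List (List Char))
    (c : Char) (h : s[i]? = some c) (hc : c ≠ '{') :
    loopB s (fuel+1) i parts ob = loopB s fuel (i+1) (parts ++ [c]) ob := by
  rw [loopB_succ_red]
  split
  · rename_i hsc; rw [h] at hsc; cases hsc
  · rename_i c' hsc; rw [h] at hsc; cases hsc
    rw [if_neg hc]

-- goOuter only appends to its accumulators
theorem goOuter_acc (s : List Char) :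
    ∀ fuel i o st, goOuter s fuel i o st =
      (o ++ (goOuter s fuel i [] []).1, st ++ (goOuter s fuel i [] []).2) := by
  intro fuel
  induction fuel with
  | zero => intro i o st; rw [goOuter_zero_red, goOuter_zero_red]; simp
  | succ fuel ih =>
    intro i o st
    cases hcell : s[i]? with
    | none => rw [goOuter_none _ _ _ _ _ hcell, goOuter_none _ _ _ _ _ hcell]; simp
    | some c =>
      by_cases hcb : c = '{'
      · subst hcb
        cases hscan : goInner s s.length (i+1) 1 ['{'] with
        | none =>
          rw [goOuter_brace_none _ _ _ _ _ hcell hscan, goOuter_brace_none _ _ _ _ _ hcell hscan]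
          simp
        | some r =>
          rw [goOuter_brace _ _ _ _ _ r hcell hscan, goOuter_brace _ _ _ _ _ r hcell hscan]
          simp only [List.nil_append]
          rw [ih r.2 (o ++ [r.1]) (st ++ [i]), ih r.2 [r.1] [i]]
          simp
      · rw [goOuter_other _ _ _ _ _ c hcell hcb, goOuter_other _ _ _ _ _ c hcell hcb,
            ih (i+1) o st, ih (i+1) ([] : List (List Char)) ([] : List Nat)]

-- the two result lists zip up, and every recorded start index is ≥ the scan start
theorem goOuter_facts (s : List Char) :
    ∀ fuel i,
      (goOuter s fuel i [] []).1.length = (goOuter s fuel i [] []).2.length ∧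
      (∀ x ∈ (goOuter s fuel i [] []).2, i ≤ x) := by
  intro fuel
  induction fuel with
  | zero => intro i; rw [goOuter_zero_red]; simp
  | succ fuel ih =>
    intro i
    cases hcell : s[i]? with
    | none => rw [goOuter_none _ _ _ _ _ hcell]; simp
    | some c =>
      by_cases hcb : c = '{'
      · subst hcb
        cases hscan : goInner s s.length (i+1) 1 ['{'] with
        | none => rw [goOuter_brace_none _ _ _ _ _ hcell hscan]; simp
        | some r =>
          have hb := (goInner_bounds s s.length (i+1) 1 ['{'] r hscan).2 one_ne_zero
          have hih := ih r.2
          rw [goOuter_brace _ _ _ _ _ r hcell hscan]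
          simp only [List.nil_append]
          rw [goOuter_acc s fuel r.2 [r.1] [i]]
          constructor
          · simp [hih.1]
          · intro x hx
            simp at hx
            rcases hx with hx | hx
            · omega
            · have := hih.2 x hx; omega
      · have hih := ih (i+1)
        rw [goOuter_other _ _ _ _ _ c hcell hcb]
        exact ⟨hih.1, fun x hx => by have := hih.2 x hx; omega⟩

-- the reconstruction of A, written as recursion over the (object, index) pairs
def reconList (s : List Char) : Nat → List (List Char × Nat) → List Char
  | c, [] => s.drop c
  | c, (obj, idx) :: rest =>
      pvSlice s c idx ++ "[Bk]".toList ++ reconList s (c + (idx - c) + obj.length) rest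

-- A's foldl over range(len(objects)) equals reconList on the zipped lists
theorem foldl_recon (s : List Char) :
    ∀ (objs : List (List Char)) (idxs : List Nat), objs.length = idxs.length →
    ∀ (sm : List Char) (c : Nat),
      (let r := (List.range objs.length).foldl (reconStep s objs idxs) (sm, c);
       r.1 ++ s.drop r.2) = sm ++ reconList s c (objs.zip idxs) := by
  intro objs
  induction objs with
  | nil => intro idxs hlen sm c; simp [reconList]
  | cons ob obs ih =>
    intro idxs hlen sm c
    cases idxs with
    | nil => simp at hlen
    | cons ix ixs =>
      simp only [List.length_cons, List.range_succ_eq_map, List.foldl_cons, List.foldl_map]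
      have hf : (fun (st : List Char × Nat) k => reconStep s (ob::obs) (ix::ixs) st (k+1))
          = reconStep s obs ixs := by
        funext st k
        simp [reconStep]
      have h0 : reconStep s (ob::obs) (ix::ixs) (sm, c) 0
          = (sm ++ pvSlice s c ix ++ "[Bk]".toList, c + (ix - c) + ob.length) := by
        simp [reconStep]
      rw [hf, h0, ih ixs (by simpa using hlen) _ _]
      simp [reconList]

-- MAIN: B's single pass produces A's reconstruction and A's object list
theorem loopB_eq (s : List Char)
    (hp : ∀ i < s.length, s[i]? = some '{' →
      ∃ j < s.length + 1, i < j ∧ (pvSlice s i j).count '{' = (pvSlice s i j).count '}') :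
    ∀ fuel i, s.length ≤ fuel + i → ∀ sm ob,
      loopB s fuel i sm ob =
        (sm ++ reconList s i (((goOuter s fuel i [] []).1).zip ((goOuter s fuel i [] []).2)),
         ob ++ (goOuter s fuel i [] []).1) := by
  intro fuel
  induction fuel with
  | zero =>
    intro i hn sm ob
    rw [loopB_zero_red, goOuter_zero_red]
    simp [reconList, List.drop_eq_nil_of_le (by omega : s.length ≤ i)]
  | succ fuel ih =>
    intro i hn sm ob
    cases hcell : s[i]? with
    | none =>
      have hge : s.length ≤ i := List.getElem?_eq_none_iff.mp hcell
      rw [loopB_none _ _ _ _ _ hcell, goOuter_none _ _ _ _ _ hcell]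
      simp [reconList, List.drop_eq_nil_of_le hge]
    | some c =>
      have hlt := (List.getElem?_eq_some_iff.mp hcell).1
      by_cases hcb : c = '{'
      · -- a '{': Pre_ guarantees the scan succeeds
        subst hcb
        obtain ⟨j, hjlen, hij, hcnt⟩ := hp i hlt hcell
        have hsi : s[i] = '{' := (List.getElem?_eq_some_iff.mp hcell).2
        have hbal : (1 : Int) + pvBal s (i+1) j = 0 := by
          have := pv_bal_cons s i j hlt hij
          simp [pvBal, hcnt, hsi, pvDelta] at this ⊢
          omega
        obtain ⟨r, hr⟩ := scanB_success s s.length (i+1) 1 (by omega)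
          ⟨j, by omega, by omega, by omega⟩
        have hrb := (scanB_bounds s s.length (i+1) 1 r hr).2 one_ne_zero
        have hgi : goInner s s.length (i+1) 1 ['{'] = some (pvSlice s i r, r) := by
          rw [goInner_eq_scanB, hr, pv_slice_cons s i r hlt (by omega), hsi]
          simp
        have hlen : (pvSlice s i r).length = r - i := pv_slice_length s i r (by omega) (by omega)
        rw [loopB_brace _ _ _ _ _ r hcell hr,
            goOuter_brace _ _ _ _ _ (pvSlice s i r, r) hcell hgi]
        simp only [List.nil_append]
        rw [goOuter_acc s fuel r [pvSlice s i r] [i],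
            ih r (by omega)]
        simp only [List.cons_append, List.nil_append, List.zip_cons_cons]
        rw [reconList]
        simp [pv_slice_self, hlen]
        have : i + (r - i) = r := by omega
        rw [this]
      · -- an ordinary character is copied
        rw [loopB_other _ _ _ _ _ c hcell hcb, goOuter_other _ _ _ _ _ c hcell hcb,
            ih (i+1) (by omega)]
        have hsi : s[i] = c := (List.getElem?_eq_some_iff.mp hcell).2
        have hrec : reconList s i (((goOuter s fuel (i+1) [] []).1).zip ((goOuter s fuel (i+1) [] []).2))
            = c :: reconList s (i+1) (((goOuter s fuel (i+1) [] []).1).zip ((goOuter s fuel (i+1) [] []).2)) := by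
          cases hz : ((goOuter s fuel (i+1) [] []).1).zip ((goOuter s fuel (i+1) [] []).2) with
          | nil =>
            simp [reconList, List.drop_eq_getElem_cons hlt, hsi]
          | cons p rest =>
            obtain ⟨obj, idx⟩ := p
            have hmem : idx ∈ (goOuter s fuel (i+1) [] []).2 := by
              have : (obj, idx) ∈ ((goOuter s fuel (i+1) [] []).1).zip ((goOuter s fuel (i+1) [] []).2) := by
                rw [hz]; exact List.mem_cons_self
              exact (List.of_mem_zip this).2
            have hidx : i + 1 ≤ idx := (goOuter_facts s fuel (i+1)).2 idx hmem
            simp only [reconList]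
            rw [pv_slice_cons s i idx hlt (by omega), hsi]
            have : i + (idx - i) + obj.length = i + 1 + (idx - (i+1)) + obj.length := by omega
            rw [this]
            simp
        rw [hrec]
        simp

-- ===== VERDICT (by name: the statement is the Claim_ definition above) =====
theorem sub_obj_with_Bk_spec : Claim_equal_sub_obj_with_Bk := by
  intro bs _hdom hpre
  unfold Spec_sub_obj_with_Bk sub_obj_with_Bk sub_obj_with_Bk_alt getObjects
  unfold Pre_sub_obj_with_Bk at hpre
  have hfacts := goOuter_facts bs.toList bs.toList.length 0
  have hfold := foldl_recon bs.toList (goOuter bs.toList bs.toList.length 0 [] []).1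
    (goOuter bs.toList bs.toList.length 0 [] []).2 hfacts.1 [] 0
  have hloop := loopB_eq bs.toList hpre bs.toList.length 0 (by omega) [] []
  simp only [] at hfold ⊢
  rw [hloop, hfold]
  simp
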